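-- pv_equiv track=rewrite | github.com/maciej-janusz/asd | offline1/zad1n2.py | strong_string
-- ===== SOURCE A (Python) =====
-- def strong_string(T):
--     n=len(T)
--     D=[1]*n
--     maks = 1
--     for i in range(n-2, -1, -1):
--         odwr = T[i][::-1]
--         for j in range(i+1, n):
--             if odwr == T[j] or T[i] == T[j]:
--                 D[i] += D[j]
--                 if D[i]>maks:
--                     maks = D[i]
--                 break
--
--     return maks
-- ===== SOURCE B (Python) =====
-- def strong_string(T):
--     # one right-to-left pass: key each string by the canonical member of {s, s[::-1]};
--     # the dict holds the chain length at the nearest index to the right with that canon.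
--     best = 1
--     c = {}
--     for t in reversed(T):
--         r = t[::-1]
--         k = t if t <= r else r
--         d = 1 + c.get(k, 0)
--         if d > best:
--             best = d
--         c[k] = d
--     return best
-- ===== Notes on version B (the rewrite author's own statement) =====
-- stated objective: faster
-- what changed: Replaces the quadratic inner scan for the nearest later matching/reversed string by a single right-to-left pass over a dict keyed by the canonical form min(s, s[::-1]), whose last write is exactly the nearest match.
import Mathlib
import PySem

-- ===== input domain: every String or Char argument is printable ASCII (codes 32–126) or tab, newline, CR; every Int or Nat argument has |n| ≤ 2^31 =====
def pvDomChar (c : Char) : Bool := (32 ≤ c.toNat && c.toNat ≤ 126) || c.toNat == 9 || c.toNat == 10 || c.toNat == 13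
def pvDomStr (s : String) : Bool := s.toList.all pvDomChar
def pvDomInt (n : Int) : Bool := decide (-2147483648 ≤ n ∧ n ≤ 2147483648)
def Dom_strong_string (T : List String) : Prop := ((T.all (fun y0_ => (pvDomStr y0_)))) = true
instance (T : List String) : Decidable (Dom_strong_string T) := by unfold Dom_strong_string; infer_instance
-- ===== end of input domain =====

-- B replaces A's quadratic nearest-later-match scan by one right-to-left pass over a dict
-- keyed by the canonical form min(s, s[::-1]); objective: faster (asymptotic, O(n²·L) → O(n·L)).

-- ===== PORT A =====

-- s[::-1]; step -1 ≠ 0, so slice? never returns none: the default is never taken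
def pvRev (s : String) : String := (PySem.Str.slice? s none none (-1)).getD ""

-- inner 'for j in range(i+1, n)' with its break: recursion over the list of j's
def pvInnerA (T : List String) (odwr ti : String) (i : Int) :
    List Int → List Int × Int → List Int × Int
  | [], st => st
  | j :: js, (D, maks) =>
      let tj := PySem.List.pyGetD T j ""
      if odwr = tj ∨ ti = tj then
        let di := PySem.List.pyGetD D i 0 + PySem.List.pyGetD D j 0
        (PySem.List.pySetD D i di, if di > maks then di else maks)
      else pvInnerA T odwr ti i js (D, maks)

def strong_string (T : List String) : Int :=
  let n : Int := PySem.List.len T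
  let st := (PySem.List.pyRange (n - 2) (-1) (-1)).foldl
    (fun st i =>
      let ti := PySem.List.pyGetD T i ""
      let odwr := pvRev ti
      pvInnerA T odwr ti i (PySem.List.pyRange (i + 1) n 1) st)
    (List.replicate n.toNat 1, 1)
  st.2

-- ===== PORT B =====

def strong_string_alt (T : List String) : Int :=
  (T.reverse.foldl
    (fun (st : PySem.Dict String Int × Int) t =>
      let r := pvRev t
      let k := if t ≤ r then t else r
      let d := 1 + st.1.getD k 0
      (st.1.insert k d, if d > st.2 then d else st.2))
    (PySem.Dict.empty, 1)).2

-- ===== PRECONDITION & SPEC =====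
def Spec_strong_string (T : List String) (out : Int) : Prop := out = strong_string_alt T
instance (T : List String) (out : Int) : Decidable (Spec_strong_string T out) := by unfold Spec_strong_string; infer_instance

-- ===== CLAIM (what is proved, stated in full; the proofs are below) =====
def Claim_equal_strong_string : Prop := ∀ (T : List String), Dom_strong_string T → Spec_strong_string T (strong_string T)

-- ===== LEMMAS AND PROOFS =====

-- common characterisation: the chain lengths D[i], computed structurally from the right
def pvDvals : List String → List Int
  | [] => []
  | t :: rest =>
      let ds := pvDvals rest
      (match rest.findIdx? (fun s => decide (pvRev t = s ∨ t = s)) with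
       | some p => 1 + ds.getD p 0
       | none => 1) :: ds

def pvMaxOf (l : List Int) : Int := l.foldl max 1

def pvCanon (t : String) : String := if t ≤ pvRev t then t else pvRev t

theorem pvRev_eq (s : String) : pvRev s = String.ofList s.toList.reverse := by
  simp [pvRev, PySem.Str.slice?_none_none_neg_one]

theorem pvRev_rev (s : String) : pvRev (pvRev s) = s := by
  rw [pvRev_eq, pvRev_eq, String.toList_ofList, List.reverse_reverse, String.ofList_toList]

theorem pvRev_inj {a b : String} (h : pvRev a = pvRev b) : a = b := by
  have := congrArg pvRev h
  rwa [pvRev_rev, pvRev_rev] at this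

theorem pvCanon_eq_iff (s t : String) : pvCanon s = pvCanon t ↔ (pvRev t = s ∨ t = s) := by
  unfold pvCanon
  constructor
  · intro h
    split_ifs at h with h1 h2 h2
    · right; exact h.symm
    · left; exact h.symm
    · left; rw [← h, pvRev_rev]
    · right; exact (pvRev_inj h).symm
  · intro h
    rcases h with h | h
    · subst h
      rw [pvRev_rev]
      split_ifs with h1 h2 h2
      · exact le_antisymm h1 h2
      · rfl
      · rfl
      · exact absurd (le_of_not_ge h1) h2
    · subst h; rfl

theorem foldl_max_out (l : List Int) : ∀ a b : Int, l.foldl max (max a b) = max (l.foldl max a) b := by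
  induction l with
  | nil => intro a b; rfl
  | cons c l ih =>
    intro a b
    simp only [List.foldl_cons]
    rw [show max (max a b) c = max (max a c) b by
      rw [max_right_comm], ih]

theorem pvMaxOf_cons (d : Int) (l : List Int) : pvMaxOf (d :: l) = max (pvMaxOf l) d := by
  simp only [pvMaxOf, List.foldl_cons]
  exact foldl_max_out l 1 d

theorem one_le_pvMaxOf (l : List Int) : 1 ≤ pvMaxOf l :=
  (PySem.List.le_foldl_max l 1).1

theorem pvDvals_length (T : List String) : (pvDvals T).length = T.length := by
  induction T with
  | nil => rfl
  | cons t rest ih => simp [pvDvals, ih]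

theorem pvInnerA_eq (T : List String) (o ti : String) (i : Int) (js : List Int) :
    ∀ D m, pvInnerA T o ti i js (D, m) =
      match js.find? (fun j => decide (o = PySem.List.pyGetD T j "" ∨ ti = PySem.List.pyGetD T j "")) with
      | none => (D, m)
      | some j =>
          let di := PySem.List.pyGetD D i 0 + PySem.List.pyGetD D j 0
          (PySem.List.pySetD D i di, if di > m then di else m) := by
  induction js with
  | nil => intro D m; rfl
  | cons j js ih =>
    intro D m
    simp only [pvInnerA, List.find?_cons]
    by_cases h : o = PySem.List.pyGetD T j "" ∨ ti = PySem.List.pyGetD T j ""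
    · simp [h]
    · simp [h, ih]

theorem pvFind_range (o ti : String) :
    ∀ (S : List String) (k : ℕ) (T : List String), T.drop k = S →
      (PySem.List.pyRange (k : Int) (T.length : Int) 1).find?
          (fun j => decide (o = PySem.List.pyGetD T j "" ∨ ti = PySem.List.pyGetD T j "")) =
        (S.findIdx? (fun s => decide (o = s ∨ ti = s))).map (fun p : ℕ => ((k + p : ℕ) : Int)) := by
  intro S
  induction S with
  | nil =>
    intro k T hdrop
    have hk : T.length ≤ k := by
      have := congrArg List.length hdrop
      simp at this
      omega
    rw [PySem.List.pyRange_one_eq_nil (by exact_mod_cast hk)]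
    simp
  | cons s S ih =>
    intro k T hdrop
    have hk : k < T.length := by
      have := congrArg List.length hdrop
      simp at this
      omega
    have hTk : T[k] = s := by
      have : (T.drop k)[0]'(by simp [hdrop]) = s := by simp [hdrop]
      simpa [List.getElem_drop] using this
    have hdrop' : T.drop (k + 1) = S := by
      have := List.drop_eq_getElem_cons hk
      rw [hdrop, hTk] at this
      exact (List.cons.injEq _ _ _ _).mp this.symm |>.2
    rw [PySem.List.pyRange_one_cons (by exact_mod_cast hk)]
    rw [List.find?_cons, List.findIdx?_cons]
    have hget : PySem.List.pyGetD T (k : Int) "" = s := by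
      rw [PySem.List.pyGetD_natCast]
      simp [List.getD_eq_getElem?_getD, hk, hTk]
    by_cases h : o = s ∨ ti = s
    · simp [hget, h]
    · have h1 : ¬(o = PySem.List.pyGetD T (k : Int) "" ∨ ti = PySem.List.pyGetD T (k : Int) "") := by
        rw [hget]; exact h
      simp only [h1, decide_false, Bool.false_eq_true, not_false_eq_true, if_neg, h, decide_false]
      have hcast : ((k : Int) + 1) = ((k + 1 : ℕ) : Int) := by push_cast; omega
      rw [hcast, ih (k + 1) T hdrop']
      cases List.findIdx? (fun s => decide (o = s ∨ ti = s)) S with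
      | none => rfl
      | some p =>
        simp only [Option.map_some, Option.some.injEq]
        push_cast
        omega

theorem pvDvals_drop_cons (T : List String) (m : ℕ) (hm : m < T.length) :
    pvDvals (T.drop m) =
      (match (T.drop (m+1)).findIdx? (fun s => decide (pvRev T[m] = s ∨ T[m] = s)) with
       | some p => 1 + (pvDvals (T.drop (m+1))).getD p 0
       | none => 1) :: pvDvals (T.drop (m+1)) := by
  rw [List.drop_eq_getElem_cons hm]
  rfl

theorem pvSet_mid : ∀ (m : ℕ) (l : List Int) (v : Int),
    (List.replicate (m+1) (1:Int) ++ l).set m v = List.replicate m 1 ++ v :: l := by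
  intro m
  induction m with
  | zero => intro l v; simp
  | succ m ih =>
    intro l v
    rw [List.replicate_succ, List.cons_append, List.set_cons_succ, ih]
    rfl

-- the outer loop invariant: after processing indices n-2 … m, D agrees with pvDvals on the suffix
theorem pvOuter_inv (T : List String) :
    ∀ m : ℕ, m ≤ T.length →
      (((List.range m).reverse.map (Int.ofNat)).foldl
        (fun st i =>
          let ti := PySem.List.pyGetD T i ""
          let odwr := pvRev ti
          pvInnerA T odwr ti i (PySem.List.pyRange (i + 1) (PySem.List.len T) 1) st)
        (List.replicate m 1 ++ pvDvals (T.drop m), pvMaxOf (pvDvals (T.drop m))))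
      = (pvDvals T, pvMaxOf (pvDvals T)) := by
  intro m
  induction m with
  | zero => intro _; simp
  | succ m ih =>
    intro hm
    rw [List.range_succ]
    simp only [List.reverse_append, List.reverse_cons, List.reverse_nil, List.nil_append,
      List.map_cons, List.cons_append, List.foldl_cons]
    have hmlt : m < T.length := by omega
    have hget : PySem.List.pyGetD T (Int.ofNat m) "" = T[m] := by
      show PySem.List.pyGetD T ((m : ℕ) : Int) "" = T[m]
      rw [PySem.List.pyGetD_natCast]
      simp [List.getD_eq_getElem?_getD, hmlt]
    have hlen : PySem.List.len T = (T.length : Int) := PySem.List.len_eq T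
    have hrange : (Int.ofNat m + 1) = (((m + 1 : ℕ)) : Int) := by simp [Int.ofNat_eq_natCast]
    have hfind := pvFind_range (pvRev T[m]) T[m] (T.drop (m+1)) (m+1) T rfl
    have step :
        (pvInnerA T (pvRev (PySem.List.pyGetD (xs := T) (Int.ofNat m) "")) (PySem.List.pyGetD (xs := T) (Int.ofNat m) "")
          (Int.ofNat m) (PySem.List.pyRange (Int.ofNat m + 1) (PySem.List.len T) 1)
          (List.replicate (m+1) 1 ++ pvDvals (T.drop (m+1)), pvMaxOf (pvDvals (T.drop (m+1)))))
        = (List.replicate m 1 ++ pvDvals (T.drop m), pvMaxOf (pvDvals (T.drop m))) := by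
      rw [hget, pvInnerA_eq, hrange, hlen, hfind]
      rw [pvDvals_drop_cons T m hmlt]
      cases hidx : (T.drop (m+1)).findIdx? (fun s => decide (pvRev T[m] = s ∨ T[m] = s)) with
      | none =>
        simp only [Option.map_none, Prod.mk.injEq]
        constructor
        · rw [List.replicate_succ']
          simp
        · rw [pvMaxOf_cons]
          exact (max_eq_left (one_le_pvMaxOf _)).symm
      | some p =>
        have hp : p < (T.drop (m+1)).length := by
          have := List.findIdx?_eq_some_iff_findIdx_eq.mp hidx
          omega
        have hplen : p < (pvDvals (T.drop (m+1))).length := by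
          rw [pvDvals_length]; exact hp
        simp only [Option.map_some]
        have hD1 : PySem.List.pyGetD (List.replicate (m+1) 1 ++ pvDvals (T.drop (m+1))) (Int.ofNat m) 0 = 1 := by
          show PySem.List.pyGetD _ ((m : ℕ) : Int) 0 = 1
          rw [PySem.List.pyGetD_natCast]
          rw [List.getD_eq_getElem?_getD]
          rw [List.getElem?_append_left (by simp)]
          simp
        have hD2 : PySem.List.pyGetD (List.replicate (m+1) 1 ++ pvDvals (T.drop (m+1))) ((m + 1 + p : ℕ) : Int) 0
            = (pvDvals (T.drop (m+1))).getD p 0 := by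
          rw [PySem.List.pyGetD_natCast]
          rw [List.getD_eq_getElem?_getD, List.getD_eq_getElem?_getD]
          rw [List.getElem?_append_right (by simp)]
          simp
        rw [hD1, hD2]
        simp only [Prod.mk.injEq]
        constructor
        · show PySem.List.pySetD _ ((m : ℕ) : Int) _ = _
          rw [PySem.List.pySetD_natCast, pvSet_mid]
        · rw [pvMaxOf_cons]
          rcases le_total (1 + (pvDvals (T.drop (m+1))).getD p 0) (pvMaxOf (pvDvals (T.drop (m+1)))) with h | h
          · rw [if_neg (by omega), max_eq_left h]
          · rw [max_eq_right h]
            by_cases h2 : 1 + (pvDvals (T.drop (m+1))).getD p 0 > pvMaxOf (pvDvals (T.drop (m+1)))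
            · rw [if_pos h2]
            · rw [if_neg h2]; omega
    rw [step]
    exact ih (by omega)

theorem strong_string_eq_maxOf (T : List String) : strong_string T = pvMaxOf (pvDvals T) := by
  cases T with
  | nil => rfl
  | cons t rest =>
    simp only [strong_string]
    have hlen : PySem.List.len (t :: rest) = ((rest.length + 1 : ℕ) : Int) := by
      rw [PySem.List.len_eq]; simp
    have hdesc : PySem.List.pyRange (((rest.length + 1 : ℕ) : Int) - 2) (-1) (-1)
        = (List.range rest.length).reverse.map (Int.ofNat) := by
      rw [PySem.List.pyRange_neg_one]
      apply List.ext_getElem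
      · simp
        omega
      · intro i h1 h2
        have hi : i < rest.length := by simpa using h2
        simp only [List.length_map, List.length_range, List.length_reverse] at h1 h2
        simp only [List.getElem_map, List.getElem_reverse, List.getElem_range, List.length_range,
          Int.ofNat_eq_natCast]
        omega
    have hdropn : (t :: rest).drop rest.length = [(t :: rest)[rest.length]] := by
      rw [List.drop_eq_getElem_cons (l := t :: rest) (by simp)]
      congr 1
      rw [List.drop_eq_nil_iff.mpr]
      simp
    have hdval1 : pvDvals ((t :: rest).drop rest.length) = [1] := by
      rw [hdropn]
      rfl
    have H := pvOuter_inv (t :: rest) rest.length (by simp)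
    simp only [hlen] at H
    rw [hdval1] at H
    rw [show pvMaxOf [(1:Int)] = 1 from rfl] at H
    simp only [hlen, hdesc]
    rw [show (((rest.length + 1 : ℕ) : Int)).toNat = rest.length + 1 by omega]
    rw [List.replicate_succ']
    rw [H]

theorem strong_string_alt_inv (T : List String) :
    (T.reverse.foldl
      (fun (st : PySem.Dict String Int × Int) t =>
        let r := pvRev t
        let k := if t ≤ r then t else r
        let d := 1 + st.1.getD k 0
        (st.1.insert k d, if d > st.2 then d else st.2))
      (PySem.Dict.empty, 1)).2 = pvMaxOf (pvDvals T) ∧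
    ∀ k, (T.reverse.foldl
      (fun (st : PySem.Dict String Int × Int) t =>
        let r := pvRev t
        let k := if t ≤ r then t else r
        let d := 1 + st.1.getD k 0
        (st.1.insert k d, if d > st.2 then d else st.2))
      (PySem.Dict.empty, 1)).1.get? k
      = (T.findIdx? (fun s => decide (pvCanon s = k))).map (fun p => (pvDvals T).getD p 0) := by
  induction T with
  | nil => constructor <;> simp [pvMaxOf, pvDvals, PySem.Dict.get?_empty]
  | cons t T ih =>
    obtain ⟨ihbest, ihdict⟩ := ih
    simp only [List.reverse_cons, List.foldl_append, List.foldl_cons, List.foldl_nil]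
    have hkey : (if t ≤ pvRev t then t else pvRev t) = pvCanon t := rfl
    have hlookup :
        (List.foldl (fun (st : PySem.Dict String Int × Int) t =>
        let r := pvRev t
        let k := if t ≤ r then t else r
        let d := 1 + st.1.getD k 0
        (st.1.insert k d, if d > st.2 then d else st.2)) (PySem.Dict.empty, 1) T.reverse).1.getD (pvCanon t) 0
        = match T.findIdx? (fun s => decide (pvRev t = s ∨ t = s)) with
          | some p => (pvDvals T).getD p 0
          | none => 0 := by
      rw [PySem.Dict.getD_eq_get?_getD, ihdict (pvCanon t)]
      have hpred : (fun s => decide (pvCanon s = pvCanon t)) = (fun s => decide (pvRev t = s ∨ t = s)) := by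
        funext s
        exact decide_eq_decide.mpr (pvCanon_eq_iff s t)
      rw [hpred]
      cases T.findIdx? (fun s => decide (pvRev t = s ∨ t = s)) <;> simp
    have hdnew : (1 : Int) + (List.foldl (fun (st : PySem.Dict String Int × Int) t =>
        let r := pvRev t
        let k := if t ≤ r then t else r
        let d := 1 + st.1.getD k 0
        (st.1.insert k d, if d > st.2 then d else st.2)) (PySem.Dict.empty, 1) T.reverse).1.getD (pvCanon t) 0
        = (pvDvals (t :: T)).getD 0 0 := by
      rw [hlookup]
      show _ = (pvDvals (t :: T)).getD 0 0
      simp only [pvDvals]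
      cases T.findIdx? (fun s => decide (pvRev t = s ∨ t = s)) <;> simp
    constructor
    · simp only [hkey]
      rw [hdnew, ihbest]
      have : pvDvals (t :: T) = (pvDvals (t :: T)).getD 0 0 :: pvDvals T := by
        simp only [pvDvals]
        cases T.findIdx? (fun s => decide (pvRev t = s ∨ t = s)) <;> simp
      conv_rhs => rw [this, pvMaxOf_cons]
      rcases le_total ((pvDvals (t :: T)).getD 0 0) (pvMaxOf (pvDvals T)) with h | h
      · rw [if_neg (by omega), max_eq_left h]
      · rw [max_eq_right h]
        by_cases h2 : (pvDvals (t :: T)).getD 0 0 > pvMaxOf (pvDvals T)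
        · rw [if_pos h2]
        · rw [if_neg h2]; omega
    · intro k
      simp only [hkey]
      rw [hdnew]
      rw [PySem.Dict.get?_insert]
      rw [List.findIdx?_cons]
      by_cases hk : k = pvCanon t
      · simp [hk]
      · have : decide (pvCanon t = k) = false := by
          simp
          intro h
          exact hk h.symm
        rw [if_neg hk, this, if_neg (by simp)]
        rw [ihdict k]
        cases hfi : T.findIdx? (fun s => decide (pvCanon s = k)) with
        | none => simp
        | some p =>
          simp only [Option.map_some, Option.some.injEq]
          show (pvDvals T).getD p 0 = (pvDvals (t :: T)).getD (p + 1) 0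
          simp only [pvDvals]
          cases T.findIdx? (fun s => decide (pvRev t = s ∨ t = s)) <;> simp

theorem strong_string_alt_eq_maxOf (T : List String) : strong_string_alt T = pvMaxOf (pvDvals T) :=
  (strong_string_alt_inv T).1

-- ===== VERDICT (by name: the statement is the Claim_ definition above) =====
theorem strong_string_spec : Claim_equal_strong_string := by
  intro T _
  unfold Spec_strong_string
  rw [strong_string_eq_maxOf, strong_string_alt_eq_maxOf]
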